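-- pv_equiv track=rewrite | github.com/TommyFurgi/introduction-to-computer-science | zestaw 6/6.5.py | sys
-- ===== SOURCE A (Python) =====
-- def sys(l):
--     p=0
--     wynik=0
--     while l>0:
--         wynik+=(l%10)*2**p
--         l//=10
--         p+=1
--     return wynik
-- ===== SOURCE B (Python) =====
-- def sys(l):
--     if l <= 0:
--         return 0
--     wynik = 0
--     for c in str(l):
--         wynik = wynik * 2 + (ord(c) - 48)
--     return wynik
-- ===== Notes on version B (the rewrite author's own statement) =====
-- stated objective: alternative
-- what changed: Replaces the least-significant-digit-first divmod loop with an explicit power-of-two term by a left-to-right Horner fold (double the accumulator, add each digit) over the decimal string of l.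
import Mathlib
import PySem

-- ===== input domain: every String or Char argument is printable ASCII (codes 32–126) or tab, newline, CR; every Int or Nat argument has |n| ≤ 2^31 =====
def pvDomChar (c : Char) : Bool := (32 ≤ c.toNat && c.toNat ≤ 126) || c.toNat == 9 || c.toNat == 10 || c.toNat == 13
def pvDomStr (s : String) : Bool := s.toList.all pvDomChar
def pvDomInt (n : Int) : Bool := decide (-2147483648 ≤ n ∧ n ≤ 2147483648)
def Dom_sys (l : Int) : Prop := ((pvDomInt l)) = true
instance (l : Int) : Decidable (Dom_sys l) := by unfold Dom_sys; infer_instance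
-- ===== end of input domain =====

-- B replaces A's least-significant-digit-first divmod loop (with its explicit power-of-two term) by a left-to-right Horner fold over str(l); equal on all ints.

-- ===== PORT A =====
-- while l>0: wynik += (l%10)*2**p; l //= 10; p += 1
def sysLoop (l p wynik : Int) : Int :=
  if _h : 0 < l then
    sysLoop (PySem.Int.floordiv l 10) (p + 1) (wynik + (PySem.Int.mod l 10) * 2 ^ p.toNat)
  else wynik
termination_by l.toNat
decreasing_by
  have h10 : PySem.Int.floordiv l 10 = l / 10 := by
    show Int.fdiv l 10 = l / 10
    rw [Int.fdiv_eq_ediv]; simp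
  simp only [h10]
  omega

def sys (l : Int) : Int := sysLoop l 0 0

-- ===== PORT B =====
def sys_alt (l : Int) : Int :=
  if l ≤ 0 then 0
  else (PySem.Int.toStr l).toList.foldl (fun wynik c => wynik * 2 + ((c.toNat : Int) - 48)) 0

-- ===== PRECONDITION & SPEC =====
def Spec_sys (l : Int) (out : Int) : Prop := out = sys_alt l
instance (l : Int) (out : Int) : Decidable (Spec_sys l out) := by unfold Spec_sys; infer_instance

-- ===== CLAIM (what is proved, stated in full; the proofs are below) =====
def Claim_equal_sys : Prop := ∀ (l : Int), Dom_sys l → Spec_sys l (sys l)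

-- ===== LEMMAS AND PROOFS =====

-- the decimal digit characters of n, most significant first (what Nat.toDigits 10 computes)
def natToChars (n : Nat) : List Char :=
  if _h : n < 10 then [Nat.digitChar (n % 10)]
  else natToChars (n / 10) ++ [Nat.digitChar (n % 10)]
termination_by n
decreasing_by omega

-- the common value: decimal digits of n read as a base-2 numeral
def binVal (n : Nat) : Int :=
  if _h : n < 10 then (n : Int)
  else binVal (n / 10) * 2 + ((n % 10 : Nat) : Int)
termination_by n
decreasing_by omega

lemma binVal_rec (n : Nat) : binVal n = binVal (n / 10) * 2 + ((n % 10 : Nat) : Int) := by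
  rw [binVal]
  split
  · rename_i h
    rw [binVal]
    have hd : n / 10 = 0 := by omega
    have hm : n % 10 = n := by omega
    simp [hd, hm]
  · rfl

lemma digitChar_toNat (d : Nat) (h : d < 10) : (Nat.digitChar d).toNat = 48 + d := by
  interval_cases d <;> decide

lemma toDigitsCore_eq (f : Nat) : ∀ (n : Nat) (ds : List Char), n < f →
    Nat.toDigitsCore 10 f n ds = natToChars n ++ ds := by
  induction f with
  | zero => intro n ds h; omega
  | succ f ih =>
    intro n ds h
    rw [Nat.toDigitsCore]
    by_cases h10 : n < 10
    · have hd : n / 10 = 0 := by omega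
      rw [if_pos hd, natToChars, dif_pos h10]
      rfl
    · have hne : ¬ n / 10 = 0 := by omega
      have hlt : n / 10 < f := by
        have : n / 10 < n := Nat.div_lt_self (by omega) (by omega)
        omega
      rw [if_neg hne, ih (n / 10) _ hlt]
      conv_rhs => rw [natToChars]
      rw [dif_neg h10, List.append_assoc]
      rfl

lemma horner_natToChars (n : Nat) :
    (natToChars n).foldl (fun wynik c => wynik * 2 + ((c.toNat : Int) - 48)) 0 = binVal n := by
  induction n using Nat.strong_induction_on with
  | _ n ih =>
    rw [natToChars, binVal]
    by_cases h10 : n < 10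
    · have hm : n % 10 = n := by omega
      simp [h10, List.foldl, hm, digitChar_toNat n h10]
    · have hlt : n / 10 < n := Nat.div_lt_self (by omega) (by omega)
      simp only [dif_neg h10, List.foldl_append, List.foldl_cons, List.foldl_nil]
      rw [ih (n / 10) hlt]
      rw [digitChar_toNat (n % 10) (by omega)]
      push_cast; ring

lemma sysLoop_eq (k : Nat) : ∀ (l p wynik : Int), l.toNat = k → 0 ≤ l → 0 ≤ p →
    sysLoop l p wynik = wynik + 2 ^ p.toNat * binVal l.toNat := by
  induction k using Nat.strong_induction_on with
  | _ k ih =>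
    intro l p wynik hk hl hp
    rw [sysLoop.eq_def]
    by_cases hpos : 0 < l
    · have hfd : PySem.Int.floordiv l 10 = Int.fdiv l 10 := rfl
      have hmd : PySem.Int.mod l 10 = Int.fmod l 10 := rfl
      have hfd2 : Int.fdiv l 10 = (l.toNat / 10 : Nat) := by
        rw [Int.fdiv_eq_ediv]; omega
      have hmd2 : Int.fmod l 10 = ((l.toNat % 10 : Nat) : Int) := by
        rw [Int.fmod_eq_emod]; omega
      have hlt : l.toNat / 10 < k := by
        have : l.toNat / 10 < l.toNat := Nat.div_lt_self (by omega) (by omega)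
        omega
      simp only [dif_pos hpos, hfd, hmd]
      rw [ih _ hlt _ _ _ (by rw [hfd2]; omega) (by rw [hfd2]; positivity) (by omega)]
      have hfd3 : (Int.fdiv l 10).toNat = l.toNat / 10 := by omega
      have hp1 : (p + 1).toNat = p.toNat + 1 := by omega
      rw [hfd3, hp1, hmd2, binVal_rec l.toNat]
      push_cast
      ring
    · have h0 : l.toNat = 0 := by omega
      rw [dif_neg hpos, h0, binVal]
      simp

-- ===== VERDICT (by name: the statement is the Claim_ definition above) =====
theorem sys_spec : Claim_equal_sys := by
  intro l _
  unfold Spec_sys sys sys_alt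
  by_cases hle : l ≤ 0
  · rw [if_pos hle, sysLoop]
    rw [dif_neg (by omega)]
  · rw [if_neg hle]
    rw [sysLoop_eq l.toNat l 0 0 rfl (by omega) le_rfl]
    have hchars : (PySem.Int.toStr l).toList = Nat.toDigits 10 l.toNat := by
      rw [PySem.Int.toList_toStr, PySem.Int.toChars, if_neg (by omega : ¬ l < 0)]
    rw [hchars, Nat.toDigits, toDigitsCore_eq _ _ _ (by omega), List.append_nil,
      horner_natToChars]
    simp
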